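-- pv_equiv track=rewrite | github.com/cry999/AtCoder | selection/shift_only.py | shift_only
-- ===== SOURCE A (Python) =====
-- def shift_only(N: int, A: list) -> int:
--     min_div = 31
--
--     for ai in A:
--         div = 0
--         while ai > 0 and ai & 1 == 0 and min_div >= div:
--             ai >>= 1
--             div += 1
--         min_div = min(div, min_div)
--
--     return min_div
-- ===== SOURCE B (Python) =====
-- def shift_only(N: int, A: list) -> int:
--     # Scan bit positions: raise d while every element is positive and divisible by 2**(d+1).
--     d = 0
--     while d < 31 and all(a > 0 and a % (1 << (d + 1)) == 0 for a in A):
--         d += 1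
--     return d
-- ===== Notes on version B (the rewrite author's own statement) =====
-- stated objective: alternative
-- what changed: Instead of counting trailing zeros of each element with a per-element Python-level shift loop and keeping a running minimum, B scans bit positions d = 0,1,2,... and raises d while every element is positive and divisible by 2**(d+1), returning the first d where that fails (capped at 31).
import Mathlib
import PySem

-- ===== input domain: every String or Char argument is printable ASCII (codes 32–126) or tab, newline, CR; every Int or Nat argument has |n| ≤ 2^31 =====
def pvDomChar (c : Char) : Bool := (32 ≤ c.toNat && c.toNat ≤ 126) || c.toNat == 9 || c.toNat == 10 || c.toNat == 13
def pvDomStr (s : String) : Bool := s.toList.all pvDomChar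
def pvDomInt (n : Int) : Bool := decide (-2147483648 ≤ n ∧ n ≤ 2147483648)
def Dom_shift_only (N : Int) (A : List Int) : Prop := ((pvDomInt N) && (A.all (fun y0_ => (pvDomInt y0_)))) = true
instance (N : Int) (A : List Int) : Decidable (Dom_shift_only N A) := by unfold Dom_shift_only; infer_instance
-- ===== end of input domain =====

-- B replaces A's per-element trailing-zero loop + running minimum by an upward scan over
-- bit positions d, advancing while every element is positive and divisible by 2^(d+1);
-- an alternative algorithm of the same cost, proved to return the same value.

-- ===== PORT A =====
-- Python's inner while loop: `ai & 1 == 0` is `ai % 2 = 0` (exact: Lean's Int `%` with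
-- positive divisor is Python's floor mod, and Python's `&1` agrees with `%2` on all ints),
-- and `ai >>= 1` under the guard `ai > 0` is exactly `ai / 2` (both round down on
-- positive operands).
def tzLoopA (ai div min_div : Int) : Int :=
  if 0 < ai ∧ ai % 2 = 0 ∧ div ≤ min_div then tzLoopA (ai / 2) (div + 1) min_div else div
termination_by ai.toNat
decreasing_by omega

def shift_only (N : Int) (A : List Int) : Int :=
  A.foldl (fun min_div ai => min (tzLoopA ai 0 min_div) min_div) 31

-- ===== PORT B =====
-- Source B's `1 << (d + 1)` is exactly `2 ^ (d + 1)`; `a % m` with positive m matches Python.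
def bLoop (A : List Int) (d : Nat) : Nat :=
  if d < 31 ∧ A.all (fun a => decide (0 < a) && (a % ((2 : Int) ^ (d + 1)) == 0)) then
    bLoop A (d + 1)
  else d
termination_by 31 - d

def shift_only_alt (_N : Int) (A : List Int) : Int :=
  (bLoop A 0 : Int)

-- ===== PRECONDITION & SPEC =====
def Spec_shift_only (N : Int) (A : List Int) (out : Int) : Prop := out = shift_only_alt N A
instance (N : Int) (A : List Int) (out : Int) : Decidable (Spec_shift_only N A out) := by unfold Spec_shift_only; infer_instance

-- ===== CLAIM (what is proved, stated in full; the proofs are below) =====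
def Claim_equal_shift_only : Prop := ∀ (N : Int) (A : List Int), Dom_shift_only N A → Spec_shift_only N A (shift_only N A)

-- ===== LEMMAS AND PROOFS =====

-- proof-side spec: uncapped trailing-zero count (0 on non-positive input, like A's guard)
def tz (a : Int) : Nat :=
  if 0 < a ∧ a % 2 = 0 then tz (a / 2) + 1 else 0
termination_by a.toNat
decreasing_by omega

def mintz (A : List Int) : Nat := A.foldl (fun m a => min m (tz a)) 31

-- A's inner while loop counts trailing zeros, capped one past the running minimum
theorem tzLoopA_eq : ∀ (ai div m : Int), 0 ≤ div → div ≤ m →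
    tzLoopA ai div m = min (div + (tz ai : Int)) (m + 1) := by
  intro ai div m
  induction ai, div using tzLoopA.induct m with
  | case1 ai div h ih =>
    intro h0 h1
    rw [tzLoopA, if_pos h, tz, if_pos ⟨h.1, h.2.1⟩]
    by_cases hdm : div + 1 ≤ m
    · rw [ih (by omega) hdm]
      push_cast
      omega
    · -- div = m: one more unfolding, third conjunct fails
      rw [tzLoopA, if_neg (by omega)]
      have : (0:Int) ≤ (tz (ai / 2) : Int) := by positivity
      push_cast
      omega
  | case2 ai div h =>
    intro h0 h1
    rw [tzLoopA, if_neg h]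
    rw [tz]
    split_ifs with h2
    · exact absurd ⟨h2.1, h2.2, h1⟩ h
    · simp
      omega

-- positivity together with divisibility by 2^(k+1) is exactly "at least k+1 trailing zeros"
theorem tz_dvd (k : Nat) : ∀ a : Int, (0 < a ∧ ((2 : Int) ^ (k + 1)) ∣ a) ↔ k + 1 ≤ tz a := by
  induction k with
  | zero =>
    intro a
    rw [tz]
    split_ifs with h
    · simp only [zero_add, pow_one]
      omega
    · simp only [zero_add, pow_one]
      omega
  | succ k ih =>
    intro a
    rw [tz]
    split_ifs with h
    · have ha : a = 2 * (a / 2) := by omega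
      have h2 : ((2:Int) ^ (k + 1 + 1)) ∣ a ↔ ((2:Int) ^ (k + 1)) ∣ (a / 2) := by
        constructor
        · intro ⟨c, hc⟩
          refine ⟨c, ?_⟩
          have h4 : a = 2 * (2 ^ (k + 1) * c) := by rw [hc, pow_succ]; ring
          rw [h4, Int.mul_ediv_cancel_left _ (by norm_num)]
        · intro ⟨c, hc⟩
          refine ⟨c, ?_⟩
          have h4 : a = 2 * (a / 2) := by omega
          rw [h4, hc, pow_succ]; ring
      have h3 : 0 < a / 2 := by omega
      have := ih (a / 2)
      rw [h2]
      omega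
    · constructor
      · rintro ⟨hpos, hdvd⟩
        have : (2:Int) ∣ a := dvd_trans (dvd_pow_self 2 (Nat.succ_ne_zero _)) hdvd
        omega
      · intro hk; omega

-- A's fold equals, over Nat, the fold of per-element tz under min
theorem foldA_eq (A : List Int) : ∀ m : Nat,
    A.foldl (fun min_div ai => min (tzLoopA ai 0 min_div) min_div) (m : Int)
      = ((A.foldl (fun m a => min m (tz a)) m : Nat) : Int) := by
  induction A with
  | nil => intro m; rfl
  | cons a A ih =>
    intro m
    simp only [List.foldl_cons]
    have h1 : min (tzLoopA a 0 (m : Int)) (m : Int) = ((min m (tz a) : Nat) : Int) := by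
      rw [tzLoopA_eq a 0 m (le_refl 0) (by positivity)]
      push_cast
      omega
    rw [h1, ih]

theorem le_foldl_min (A : List Int) : ∀ (m k : Nat),
    (k ≤ A.foldl (fun m a => min m (tz a)) m) ↔ (k ≤ m ∧ ∀ a ∈ A, k ≤ tz a) := by
  induction A with
  | nil => intro m k; simp
  | cons a A ih =>
    intro m k
    simp only [List.foldl_cons, List.mem_cons]
    rw [ih]
    constructor
    · rintro ⟨h1, h2⟩
      refine ⟨by omega, fun b hb => ?_⟩
      rcases hb with rfl | hb
      · omega
      · exact h2 b hb
    · rintro ⟨h1, h2⟩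
      exact ⟨by have := h2 a (Or.inl rfl); omega, fun b hb => h2 b (Or.inr hb)⟩

theorem mintz_le (A : List Int) : mintz A ≤ 31 := by
  have := (le_foldl_min A 31 (mintz A)).mp (le_refl _)
  exact this.1

-- B's loop guard at position d holds exactly when the capped minimum exceeds d
theorem allDiv_iff (A : List Int) (d : Nat) (hd : d < 31) :
    (A.all (fun a => decide (0 < a) && (a % ((2 : Int) ^ (d + 1)) == 0)) = true)
      ↔ d + 1 ≤ mintz A := by
  rw [show mintz A = A.foldl (fun m a => min m (tz a)) 31 from rfl, le_foldl_min]
  simp only [List.all_eq_true, Bool.and_eq_true, decide_eq_true_eq, beq_iff_eq]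
  constructor
  · intro h
    refine ⟨by omega, fun a ha => ?_⟩
    have := h a ha
    exact (tz_dvd d a).mp ⟨this.1, Int.dvd_of_emod_eq_zero this.2⟩
  · rintro ⟨-, h⟩
    intro a ha
    have h2 := (tz_dvd d a).mpr (h a ha)
    exact ⟨h2.1, Int.emod_eq_zero_of_dvd h2.2⟩

theorem bLoop_eq (A : List Int) : ∀ d : Nat, d ≤ mintz A → bLoop A d = mintz A := by
  intro d
  induction d using bLoop.induct A with
  | case1 d h ih =>
    intro hd
    rw [bLoop, if_pos h]
    exact ih ((allDiv_iff A d h.1).mp h.2)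
  | case2 d h =>
    intro hd
    rw [bLoop, if_neg h]
    have hle := mintz_le A
    by_cases h31 : d < 31
    · have : ¬ (d + 1 ≤ mintz A) := fun hc => h ⟨h31, (allDiv_iff A d h31).mpr hc⟩
      omega
    · omega

-- ===== VERDICT (by name: the statement is the Claim_ definition above) =====
theorem shift_only_spec : Claim_equal_shift_only := by
  intro N A _
  unfold Spec_shift_only shift_only shift_only_alt
  rw [show (31 : Int) = ((31 : Nat) : Int) from rfl, foldA_eq, bLoop_eq A 0 (Nat.zero_le _)]
  rfl
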